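-- pv_equiv track=rewrite | github.com/KevinCheng713/stanCode_project | stanCode_projects/hangman game/similarity.py | homology
-- ===== SOURCE A (Python) =====
-- def homology(new_long_sequence, new_short_sequence):
--     # start from an empty string
--     ans = ''
--     highest_score = 0
--     """
--     The number in parentheses is the length of the long sequence minus the length of the short sequence,
--     then plus one.
--     """
--     for i in range(len(new_long_sequence)-len(new_short_sequence)+1):
--
--         # ch is a string used to access long_sequence
--         ch = new_long_sequence[i:i+len(new_short_sequence)]
--
--         # score is used to calculate the number of matches
--         score = 0
--
--         # use absolute position for two strings (It ensures that they correspond to each other.)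
--         for j in range(len(new_short_sequence)):
--             if new_short_sequence[j] == ch[j]:
--                 score += 1
--         # As the similarity increases, the access string is changed
--         if score > highest_score:
--             highest_score = score
--             ans = ch
--     return ans
-- ===== SOURCE B (Python) =====
-- def _first_at_least(js, x):
--     # hand-rolled bisect_left: index of the first element >= x (js ascending)
--     lo, hi = 0, len(js)
--     while lo < hi:
--         mid = (lo + hi) // 2
--         if js[mid] < x:
--             lo = mid + 1
--         else:
--             hi = mid
--     return lo
--
--
-- def homology(new_long_sequence, new_short_sequence):
--     n, m = len(new_long_sequence), len(new_short_sequence)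
--     k = n - m + 1
--     if k <= 0:
--         return ''
--     # positions of each character in the short sequence (ascending)
--     pos = {}
--     for j, c in enumerate(new_short_sequence):
--         pos.setdefault(c, []).append(j)
--     # per-offset match counts via character correlation: each matching pair
--     # (p in long, j in short with the same character) contributes to offset p - j;
--     # binary search keeps only the positions whose offset lands in [0, k)
--     offsets = [0] * k
--     for p, c in enumerate(new_long_sequence):
--         js = pos.get(c, ())
--         lo = _first_at_least(js, p - k + 1)
--         hi = _first_at_least(js, p + 1)
--         for j in js[lo:hi]:
--             offsets[p - j] += 1
--     best = max(offsets)
--     if best == 0: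
--         return ''
--     i = offsets.index(best)
--     return new_long_sequence[i:i + m]
-- ===== Notes on version B (the rewrite author's own statement) =====
-- stated objective: alternative
-- what changed: A scores each window by an inner positional loop and tracks a running best; B builds a dict from character to its ascending positions in the short sequence and, in one pass over the long sequence, adds +1 into a per-offset match-count array at offset p-j for each same-character pair (character-indexed cross-correlation, with a hand-rolled bisect_left restricting to positions whose offset lands in [0,k)), then takes max and first index of the counts array.
import Mathlib
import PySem

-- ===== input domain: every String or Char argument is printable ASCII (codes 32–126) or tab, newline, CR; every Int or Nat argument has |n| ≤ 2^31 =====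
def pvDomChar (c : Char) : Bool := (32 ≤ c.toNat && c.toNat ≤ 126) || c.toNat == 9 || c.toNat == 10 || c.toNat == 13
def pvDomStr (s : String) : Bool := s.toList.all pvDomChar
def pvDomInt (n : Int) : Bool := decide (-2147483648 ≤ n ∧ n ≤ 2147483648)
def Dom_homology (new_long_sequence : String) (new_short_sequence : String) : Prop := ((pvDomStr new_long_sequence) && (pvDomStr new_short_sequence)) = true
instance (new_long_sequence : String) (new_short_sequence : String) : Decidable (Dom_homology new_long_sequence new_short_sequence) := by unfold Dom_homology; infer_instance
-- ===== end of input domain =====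

-- B replaces A's per-window inner scoring loop by a character-indexed cross-correlation:
-- a dict char -> positions in the short sequence, one pass over the long sequence adding
-- +1 at offset p - j into a counts array (a hand-rolled bisect_left keeps only positions
-- whose offset lands in [0, k)), then max and first index of that array.

-- ===== PORT A =====
-- inner loop of A: for j in range(len(short)): if short[j] == ch[j]: score += 1
-- (every index j is in range for both lists at every call site, so pyGetD is exact there)
def aScore (sl ch : List Char) : Int :=
  (PySem.List.pyRange 0 ((sl.length : Int)) 1).foldl
    (fun sc j => if PySem.List.pyGetD sl j ' ' == PySem.List.pyGetD ch j ' ' then sc + 1 else sc)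
    (0 : Int)

def homology (new_long_sequence : String) (new_short_sequence : String) : String :=
  String.ofList
    (((PySem.List.pyRange 0 ((new_long_sequence.toList.length : Int) - (new_short_sequence.toList.length : Int) + 1) 1).foldl
      (fun (st : List Char × Int) i =>
        let ch := PySem.List.slice new_long_sequence.toList (some i)
          (some (i + (new_short_sequence.toList.length : Int)))
        let score := aScore new_short_sequence.toList ch
        if score > st.2 then (ch, score) else st)
      (([] : List Char), (0 : Int))).1)

-- ===== PORT B =====
-- hand-rolled bisect_left (_first_at_least): index of the first element >= x (js ascending);
-- js[mid] is exact via pyGetD: every call keeps lo <= mid < hi <= len(js)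
def firstAtLeast (js : List Int) (x : Int) (lo hi : Nat) : Nat :=
  if _h : lo < hi then
    if PySem.List.pyGetD js (((lo + hi) / 2 : Nat) : Int) 0 < x then
      firstAtLeast js x ((lo + hi) / 2 + 1) hi
    else
      firstAtLeast js x lo ((lo + hi) / 2)
  else lo
termination_by hi - lo
decreasing_by all_goals omega

-- pos.setdefault(c, []).append(j) over enumerate(short)
def posTable (sl : List Char) : PySem.Dict Char (List Int) :=
  (PySem.List.enumerate sl 0).foldl (fun d p => d.modify p.2 [] (· ++ [p.1])) PySem.Dict.empty

-- for j in js[lo:hi]: offsets[p - j] += 1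
def bumpLoop (off : List Int) (p : Int) (js : List Int) : List Int :=
  js.foldl (fun off j =>
    PySem.List.pySetD off (p - j) (PySem.List.pyGetD off (p - j) 0 + 1)) off

def homology_alt (new_long_sequence : String) (new_short_sequence : String) : String :=
  let ll := new_long_sequence.toList
  let sl := new_short_sequence.toList
  let k : Int := (ll.length : Int) - (sl.length : Int) + 1
  if k ≤ 0 then ""
  else
    let pos := posTable sl
    let offsets := (PySem.List.enumerate ll 0).foldl
      (fun off pr =>
        let js := pos.getD pr.2 []
        let lo := firstAtLeast js (pr.1 - k + 1) 0 js.length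
        let hi := firstAtLeast js (pr.1 + 1) 0 js.length
        bumpLoop off pr.1 (PySem.List.slice js (some (lo : Int)) (some (hi : Int))))
      (List.replicate k.toNat (0 : Int))
    match PySem.List.max? offsets (fun x => x) with
    | none => ""   -- unreachable: k > 0 makes offsets nonempty
    | some best =>
      if best = 0 then ""
      else
        match PySem.List.index? offsets best with
        | some i => String.ofList (PySem.List.slice ll (some (i : Int)) (some ((i : Int) + (sl.length : Int))))
        | none => ""   -- unreachable: best is an element of offsets

-- ===== PRECONDITION & SPEC =====
def Spec_homology (new_long_sequence : String) (new_short_sequence : String) (out : String) : Prop := out = homology_alt new_long_sequence new_short_sequence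
instance (new_long_sequence : String) (new_short_sequence : String) (out : String) : Decidable (Spec_homology new_long_sequence new_short_sequence out) := by unfold Spec_homology; infer_instance

-- ===== CLAIM (what is proved, stated in full; the proofs are below) =====
def Claim_equal_homology : Prop := ∀ (new_long_sequence : String) (new_short_sequence : String), Dom_homology new_long_sequence new_short_sequence → Spec_homology new_long_sequence new_short_sequence (homology new_long_sequence new_short_sequence)

-- ===== LEMMAS AND PROOFS =====

-- the window at offset i
def wnd (ll : List Char) (m : Nat) (i : Int) : List Char :=
  PySem.List.slice ll (some i) (some (i + (m : Int)))

-- canonical match count of the short sequence against a window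
def bCount (sl ch : List Char) : Int :=
  (sl.zip ch).foldl (fun sc p => sc + (if p.1 == p.2 then (1 : Int) else 0)) 0

-- positions of c in sl, as B's dict stores them
def posList (sl : List Char) (c : Char) : List Int :=
  ((PySem.List.enumerate sl 0).filter (fun p => p.2 == c)).map (·.1)

-- number of matching pairs (p, p-q) with p < t contributing to offset q
def matchCnt (sl ll : List Char) (q t : Nat) : Int :=
  (((List.range t).filter
    (fun p => decide (q ≤ p) && decide (p - q < sl.length) && (sl.getD (p - q) ' ' == ll.getD p ' '))).length : Int)

theorem posTable_getD (sl : List Char) (c : Char) :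
    (posTable sl).getD c [] = posList sl c := by
  unfold posTable posList
  have h1 : (PySem.List.enumerate sl 0).foldl (fun d p => d.modify p.2 [] (· ++ [p.1])) PySem.Dict.empty
      = ((PySem.List.enumerate sl 0).map (fun p => (p.2, p.1))).foldl
          (fun d q => d.modify q.1 [] (· ++ [q.2])) PySem.Dict.empty := by
    rw [List.foldl_map]
  rw [h1, PySem.Dict.getD_foldl_modify_append]
  rw [PySem.Dict.getD_empty]
  rw [List.filter_map]
  simp [List.map_map]
  rfl

theorem mem_posList (sl : List Char) (c : Char) (v : Int) :
    v ∈ posList sl c ↔ ∃ j : Nat, j < sl.length ∧ v = (j : Int) ∧ sl.getD j ' ' = c := by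
  unfold posList
  simp only [List.mem_map, List.mem_filter]
  constructor
  · rintro ⟨p, ⟨hp, hc⟩, rfl⟩
    obtain ⟨j, hj, rfl⟩ := (PySem.List.mem_enumerate_iff _ _ _).mp hp
    exact ⟨j, hj, by simp, by simp_all [List.getD_eq_getElem?_getD]⟩
  · rintro ⟨j, hj, rfl, hc⟩
    refine ⟨((j : Int), sl[j]), ⟨(PySem.List.mem_enumerate_iff _ _ _).mpr ⟨j, hj, by simp⟩, ?_⟩, rfl⟩
    simp [List.getD_eq_getElem?_getD, List.getElem?_eq_getElem hj] at hc
    simp [hc]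

theorem nodup_posList (sl : List Char) (c : Char) : (posList sl c).Nodup := by
  unfold posList
  have h1 : ((PySem.List.enumerate sl 0).filter (fun p => p.2 == c)).Pairwise (fun p q => p.1 < q.1) :=
    (PySem.List.pairwise_lt_enumerate sl 0).filter _
  have h2 : (((PySem.List.enumerate sl 0).filter (fun p => p.2 == c)).map (·.1)).Pairwise (· < ·) :=
    List.pairwise_map.mpr h1
  exact h2.imp ne_of_lt

theorem count_posList (sl : List Char) (c : Char) (t q : Nat) :
    (posList sl c).count ((t : Int) - (q : Int)) =
      (if q ≤ t ∧ t - q < sl.length ∧ sl.getD (t - q) ' ' = c then 1 else 0) := by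
  by_cases hm : (t : Int) - (q : Int) ∈ posList sl c
  · rw [List.count_eq_one_of_mem (nodup_posList sl c) hm]
    obtain ⟨j, hj, hv, hc⟩ := (mem_posList sl c _).mp hm
    rw [if_pos ⟨by omega, by omega, by rwa [show t - q = j by omega]⟩]
  · rw [List.count_eq_zero_of_not_mem hm]
    rw [if_neg]
    intro ⟨h1, h2, h3⟩
    exact hm ((mem_posList sl c _).mpr ⟨t - q, h2, by omega, h3⟩)

theorem bumpLoop_length (off : List Int) (p : Int) (js : List Int) :
    (bumpLoop off p js).length = off.length := by
  unfold bumpLoop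
  induction js generalizing off with
  | nil => rfl
  | cons j js ih =>
    simp only [List.foldl_cons]
    rw [ih]
    exact PySem.List.length_pySetD _ _ _

theorem bumpLoop_getElem? (off : List Int) (p : Int) (js : List Int)
    (q : Nat) (hq : q < off.length)
    (hin : ∀ j ∈ js, 0 ≤ p - j ∧ p - j < (off.length : Int)) :
    (bumpLoop off p js)[q]? =
      off[q]?.map (fun x => x + ((js.count (p - (q : Int))) : Int)) := by
  induction js generalizing off with
  | nil => simp [bumpLoop]
  | cons j js ih =>
    have hstep : bumpLoop off p (j :: js) = bumpLoop
        (PySem.List.pySetD off (p - j) (PySem.List.pyGetD off (p - j) 0 + 1)) p js := rfl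
    rw [hstep]
    have hg : 0 ≤ p - j ∧ p - j < (off.length : Int) := hin j (List.mem_cons_self ..)
    have hlen' : (PySem.List.pySetD off (p - j) (PySem.List.pyGetD off (p - j) 0 + 1)).length = off.length :=
      PySem.List.length_pySetD _ _ _
    rw [ih _ (by omega) (by intro j' hj'; rw [hlen']; exact hin j' (List.mem_cons_of_mem _ hj'))]
    rw [PySem.List.pySetD_of_nonneg _ _ hg.1]
    rw [List.getElem?_set]
    by_cases hij : p - j = (q : Int)
    · have hnq : (p - j).toNat = q := by omega
      rw [if_pos hnq]
      rw [if_pos (by omega)]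
      have hget : PySem.List.pyGetD off (p - j) 0 = off[(p - j).toNat]'(by omega) :=
        PySem.List.pyGetD_eq_getElem off 0 hg.1 (by omega)
      rw [hget]
      rw [List.getElem?_eq_getElem hq]
      have : off[(p - j).toNat]'(by omega) = off[q]'hq := by
        congr 1
      rw [this]
      have hcnt : (j :: js).count (p - (q : Int)) = js.count (p - (q : Int)) + 1 := by
        rw [List.count_cons]
        simp [show j = p - (q:Int) by omega]
      rw [hcnt]
      simp only [Option.map_some]
      congr 1
      push_cast
      ring
    · rw [if_neg (by omega)]
      have hcnt : (j :: js).count (p - (q : Int)) = js.count (p - (q : Int)) := by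
        rw [List.count_cons]
        simp [show ¬ (j = p - (q:Int)) by omega]
      rw [hcnt]

theorem bumpLoop_map (K : Nat) (f : Nat → Int) (p : Int) (js : List Int)
    (hin : ∀ j ∈ js, 0 ≤ p - j ∧ p - j < (K : Int)) :
    bumpLoop ((List.range K).map f) p js =
      (List.range K).map (fun q => f q + ((js.count (p - (q : Int))) : Int)) := by
  apply List.ext_getElem?
  intro q
  by_cases hq : q < K
  · rw [bumpLoop_getElem? _ p js q (by simp [hq]) (by simpa using hin)]
    simp [List.getElem?_range hq]
  · have h1 : (bumpLoop ((List.range K).map f) p js).length = K := by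
      rw [bumpLoop_length]; simp
    rw [List.getElem?_eq_none (by omega), List.getElem?_eq_none (by simp; omega)]

-- positions of a character are strictly increasing
theorem sorted_posList (sl : List Char) (c : Char) : (posList sl c).Pairwise (· ≤ ·) := by
  unfold posList
  have h1 : ((PySem.List.enumerate sl 0).filter (fun p => p.2 == c)).Pairwise (fun p q => p.1 < q.1) :=
    (PySem.List.pairwise_lt_enumerate sl 0).filter _
  exact (List.pairwise_map.mpr h1).imp le_of_lt

-- the hand-rolled bisect_left, characterised: it partitions a sorted list at x
theorem fal_spec (js : List Int) (x : Int) (hsort : js.Pairwise (· ≤ ·)) (lo hi : Nat)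
    (hhi : hi ≤ js.length) (hlh : lo ≤ hi)
    (hbelow : ∀ i (h : i < js.length), i < lo → js[i] < x)
    (habove : ∀ i (h : i < js.length), hi ≤ i → x ≤ js[i]) :
    lo ≤ firstAtLeast js x lo hi ∧ firstAtLeast js x lo hi ≤ hi ∧
    (∀ i (h : i < js.length), i < firstAtLeast js x lo hi → js[i] < x) ∧
    (∀ i (h : i < js.length), firstAtLeast js x lo hi ≤ i → x ≤ js[i]) := by
  have hmono : ∀ (i j : Nat) (hi1 : i < js.length) (hj1 : j < js.length), i ≤ j → js[i] ≤ js[j] := by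
    intro i j hi1 hj1 hij
    rcases Nat.lt_or_ge i j with h | h
    · exact (List.pairwise_iff_getElem.mp hsort) i j hi1 hj1 h
    · have : i = j := by omega
      subst this
      rfl
  induction hd : hi - lo using Nat.strong_induction_on generalizing lo hi with
  | _ n ih =>
    rw [firstAtLeast]
    by_cases hlt : lo < hi
    · rw [dif_pos hlt]
      have hmid1 : lo ≤ (lo + hi) / 2 := by omega
      have hmid2 : (lo + hi) / 2 < hi := by omega
      have hmlen : (lo + hi) / 2 < js.length := by omega
      have hget : PySem.List.pyGetD js ((((lo + hi) / 2 : Nat)) : Int) 0 = js[(lo + hi) / 2]'hmlen := by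
        rw [PySem.List.pyGetD_natCast]
        exact List.getD_eq_getElem js 0 hmlen
      rw [hget]
      by_cases hcmp : js[(lo + hi) / 2]'hmlen < x
      · rw [if_pos hcmp]
        have := ih (hi - ((lo + hi) / 2 + 1)) (by omega) ((lo + hi) / 2 + 1) hi hhi (by omega)
          (fun i h hi2 => lt_of_le_of_lt (hmono i ((lo + hi) / 2) h hmlen (by omega)) hcmp)
          habove rfl
        exact ⟨by omega, this.2.1, this.2.2.1, this.2.2.2⟩
      · rw [if_neg hcmp]
        have := ih ((lo + hi) / 2 - lo) (by omega) lo ((lo + hi) / 2) (by omega) (by omega)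
          hbelow
          (fun i h hi2 => le_trans (not_lt.mp hcmp) (hmono ((lo + hi) / 2) i hmlen h hi2)) rfl
        exact ⟨this.1, by omega, this.2.2.1, this.2.2.2⟩
    · rw [dif_neg hlt]
      have : lo = hi := by omega
      subst this
      exact ⟨le_refl _, le_refl _, fun i h hi2 => hbelow i h hi2, fun i h hi2 => habove i h hi2⟩

-- js[lo:hi] for the two binary-search bounds: exactly the positions with offset in [0, k)
theorem slice_bounds (js : List Int) (k p : Int) (hsort : js.Pairwise (· ≤ ·)) :
    (∀ j ∈ PySem.List.slice js (some ((firstAtLeast js (p - k + 1) 0 js.length : Nat) : Int))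
        (some ((firstAtLeast js (p + 1) 0 js.length : Nat) : Int)),
      p - k + 1 ≤ j ∧ j ≤ p) ∧
    (0 < k → ∀ v : Int, p - k + 1 ≤ v → v ≤ p →
      (PySem.List.slice js (some ((firstAtLeast js (p - k + 1) 0 js.length : Nat) : Int))
        (some ((firstAtLeast js (p + 1) 0 js.length : Nat) : Int))).count v = js.count v) := by
  obtain ⟨-, hlo2, hlo3, hlo4⟩ := fal_spec js (p - k + 1) hsort 0 js.length (le_refl _)
    (by omega) (by omega) (fun i h hi2 => absurd hi2 (by omega))
  obtain ⟨-, hhi2, hhi3, hhi4⟩ := fal_spec js (p + 1) hsort 0 js.length (le_refl _)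
    (by omega) (by omega) (fun i h hi2 => absurd hi2 (by omega))
  set lo := firstAtLeast js (p - k + 1) 0 js.length with hlodef
  set hi := firstAtLeast js (p + 1) 0 js.length with hhidef
  rw [PySem.List.slice_natCast]
  have hmem : ∀ j ∈ (js.drop lo).take (hi - lo), p - k + 1 ≤ j ∧ j ≤ p := by
    intro j hj
    obtain ⟨t, ht, rfl⟩ := List.mem_iff_getElem.mp hj
    have htlen : t < hi - lo := by
      have := List.length_take_le (hi - lo) (js.drop lo)
      omega
    have htd : lo + t < js.length := by
      have h1 := ht
      simp only [List.length_take, List.length_drop] at h1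
      omega
    have hval : ((js.drop lo).take (hi - lo))[t]'ht = js[lo + t]'htd := by
      rw [List.getElem_take, List.getElem_drop]
    rw [hval]
    constructor
    · exact hlo4 (lo + t) htd (by omega)
    · have := hhi3 (lo + t) htd (by omega)
      omega
  refine ⟨hmem, ?_⟩
  intro hk v hv1 hv2
  have hlh : lo ≤ hi := by
    by_contra hcon0
    have hcon : hi < lo := by omega
    have hhilen : hi < js.length := by omega
    have h1 := hlo3 hi hhilen hcon
    have h2 := hhi4 hi hhilen (le_refl _)
    omega
  -- js = take lo ++ slice ++ drop hi, and v only occurs in the middle part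
  have hdecomp : js = js.take lo ++ ((js.drop lo).take (hi - lo) ++ js.drop hi) := by
    rw [show js.drop hi = (js.drop lo).drop (hi - lo) by rw [List.drop_drop]; congr 1; omega]
    rw [List.take_append_drop, List.take_append_drop]
  have hcnt1 : (js.take lo).count v = 0 := by
    apply List.count_eq_zero_of_not_mem
    intro hmem1
    obtain ⟨t, ht, hveq⟩ := List.mem_iff_getElem.mp hmem1
    have htlo : t < lo := by
      have := List.length_take_le lo js
      simp only [List.length_take] at ht
      omega
    have htd : t < js.length := by
      simp only [List.length_take] at ht
      omega
    have : js[t]'htd < p - k + 1 := hlo3 t htd htlo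
    rw [List.getElem_take] at hveq
    omega
  have hcnt2 : (js.drop hi).count v = 0 := by
    apply List.count_eq_zero_of_not_mem
    intro hmem1
    obtain ⟨t, ht, hveq⟩ := List.mem_iff_getElem.mp hmem1
    have htd : hi + t < js.length := by
      simp only [List.length_drop] at ht
      omega
    have : p + 1 ≤ js[hi + t]'htd := hhi4 (hi + t) htd (by omega)
    rw [List.getElem_drop] at hveq
    omega
  conv_rhs => rw [hdecomp]
  rw [List.count_append, List.count_append, hcnt1, hcnt2]
  omega

theorem pred_decide (sl ll : List Char) (q p : Nat) :
    (decide (q ≤ p) && decide (p - q < sl.length) && (sl.getD (p - q) ' ' == ll.getD p ' '))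
      = decide (q ≤ p ∧ p - q < sl.length ∧ sl.getD (p - q) ' ' = ll.getD p ' ') := by
  simp [Bool.and_assoc, Bool.beq_eq_decide_eq]

theorem matchCnt_succ (sl ll : List Char) (q t : Nat) :
    matchCnt sl ll q (t + 1) = matchCnt sl ll q t +
      (if q ≤ t ∧ t - q < sl.length ∧ sl.getD (t - q) ' ' = ll.getD t ' ' then 1 else 0) := by
  unfold matchCnt
  rw [List.range_succ, List.filter_append]
  simp only [List.length_append]
  push_cast
  congr 1
  rw [List.filter_singleton, pred_decide]
  by_cases h : q ≤ t ∧ t - q < sl.length ∧ sl.getD (t - q) ' ' = ll.getD t ' '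
  · rw [if_pos h, decide_eq_true h]
    rfl
  · rw [if_neg h, decide_eq_false h]
    rfl

theorem bumpLoop_nil (p : Int) (js : List Int) : bumpLoop [] p js = [] :=
  List.eq_nil_of_length_eq_zero (by rw [bumpLoop_length]; rfl)

theorem fold_enum (sl ll : List Char) (k : Int) (K : Nat) (hk : (K : Int) = k)
    (tl : List Char) (s : Nat) (hs : tl = ll.drop s) :
    (PySem.List.enumerate tl (s : Int)).foldl
        (fun off pr =>
          let js := (posTable sl).getD pr.2 []
          let lo := firstAtLeast js (pr.1 - k + 1) 0 js.length
          let hi := firstAtLeast js (pr.1 + 1) 0 js.length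
          bumpLoop off pr.1 (PySem.List.slice js (some (lo : Int)) (some (hi : Int))))
        ((List.range K).map (fun q => matchCnt sl ll q s)) =
      (List.range K).map (fun q => matchCnt sl ll q (s + tl.length)) := by
  rcases Nat.eq_zero_or_pos K with hK0 | hKpos
  · subst hK0
    simp only [List.range_zero, List.map_nil]
    induction tl generalizing s with
    | nil => simp [PySem.List.enumerate_nil]
    | cons c tl' ih =>
      rw [PySem.List.enumerate_cons]
      simp only [List.foldl_cons, bumpLoop_nil]
      have hs' : tl' = ll.drop (s + 1) := by
        rw [← List.drop_drop, ← hs]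
        rfl
      have := ih (s + 1) hs'
      rw [show ((s : Int) + 1) = (((s + 1 : Nat)) : Int) by push_cast; ring]
      exact this
  · have hkpos : 0 < k := by omega
    induction tl generalizing s with
    | nil => simp [PySem.List.enumerate_nil]
    | cons c tl' ih =>
      rw [PySem.List.enumerate_cons]
      simp only [List.foldl_cons]
      have hc : ll.getD s ' ' = c := by
        have h0 : (ll.drop s)[0]? = some c := by rw [← hs]; rfl
        rw [List.getElem?_drop] at h0
        rw [List.getD_eq_getElem?_getD, show s = s + 0 from rfl, h0]
        rfl
      have hstep : bumpLoop ((List.range K).map (fun q => matchCnt sl ll q s)) (s : Int)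
            (PySem.List.slice ((posTable sl).getD c [])
              (some ((firstAtLeast ((posTable sl).getD c []) ((s : Int) - k + 1) 0 ((posTable sl).getD c []).length : Nat) : Int))
              (some ((firstAtLeast ((posTable sl).getD c []) ((s : Int) + 1) 0 ((posTable sl).getD c []).length : Nat) : Int)))
          = (List.range K).map (fun q => matchCnt sl ll q (s + 1)) := by
        rw [posTable_getD]
        obtain ⟨hmem, hcnt⟩ := slice_bounds (posList sl c) k (s : Int) (sorted_posList sl c)
        rw [bumpLoop_map K _ _ _ (by
          intro j hj
          have := hmem j hj
          constructor <;> omega)]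
        apply List.map_congr_left
        intro q hq
        have hqK : q < K := List.mem_range.mp hq
        rw [hcnt hkpos ((s : Int) - (q : Int)) (by omega) (by omega)]
        rw [count_posList sl c s q]
        rw [matchCnt_succ]
        congr 1
        by_cases h : q ≤ s ∧ s - q < sl.length ∧ sl.getD (s - q) ' ' = c
        · rw [if_pos h, if_pos ⟨h.1, h.2.1, by rw [hc]; exact h.2.2⟩]
          rfl
        · rw [if_neg h, if_neg (fun hh => h ⟨hh.1, hh.2.1, by rw [← hc]; exact hh.2.2⟩)]
          rfl
      rw [hstep]
      have hs' : tl' = ll.drop (s + 1) := by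
        rw [← List.drop_drop, ← hs]
        rfl
      have := ih (s + 1) hs'
      rw [show ((s : Int) + 1) = (((s + 1 : Nat)) : Int) by push_cast; ring]
      rw [this]
      congr 1
      funext q
      congr 1
      simp
      omega

theorem bCount_eq_filter (u v : List Char) :
    bCount u v = (((List.range (min u.length v.length)).filter
      (fun j => u.getD j ' ' == v.getD j ' ')).length : Int) := by
  induction u generalizing v with
  | nil => simp [bCount]
  | cons a u' ih =>
    cases v with
    | nil => simp [bCount]
    | cons b v' =>
      have h1 : bCount (a :: u') (b :: v') = (if a == b then (1:Int) else 0) + bCount u' v' := by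
        unfold bCount
        rw [List.zip_cons_cons, List.foldl_cons]
        rw [PySem.List.foldl_add, PySem.List.foldl_add]
        simp
      rw [h1, ih v']
      have h2 : min (a :: u').length (b :: v').length = min u'.length v'.length + 1 := by
        simp only [List.length_cons]
        omega
      rw [h2]
      rw [List.range_succ_eq_map]
      rw [List.filter_cons]
      simp only [List.getD_cons_zero]
      rw [List.filter_map]
      have h3 : ((fun j => (a :: u').getD j ' ' == (b :: v').getD j ' ') ∘ Nat.succ)
          = (fun j => u'.getD j ' ' == v'.getD j ' ') := by
        funext j
        simp [Function.comp]
      rw [h3]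
      by_cases hab : (a == b) = true
      · rw [if_pos hab, hab]
        simp only [if_true, List.length_cons, List.length_map]
        push_cast
        ring
      · rw [if_neg hab]
        rw [Bool.not_eq_true] at hab
        rw [hab]
        simp only [Bool.false_eq_true, if_false, List.length_map]
        ring

theorem matchCnt_final (sl ll : List Char) (q : Nat) (hq : q + sl.length ≤ ll.length) :
    matchCnt sl ll q ll.length = bCount sl (wnd ll sl.length (q : Int)) := by
  have hwnd : wnd ll sl.length (q : Int) = (ll.drop q).take sl.length := by
    unfold wnd
    exact PySem.List.slice_natCast_add ll q sl.length
  have hwlen : (wnd ll sl.length (q : Int)).length = sl.length := by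
    rw [hwnd]
    simp only [List.length_take, List.length_drop]
    omega
  rw [bCount_eq_filter, hwlen, Nat.min_self]
  -- window elements are elements of ll shifted by q
  have hwget : ∀ j, j < sl.length → (wnd ll sl.length (q : Int)).getD j ' ' = ll.getD (q + j) ' ' := by
    intro j hj
    rw [hwnd, List.getD_eq_getElem?_getD, List.getD_eq_getElem?_getD]
    rw [List.getElem?_take_of_lt hj, List.getElem?_drop]
  unfold matchCnt
  have hsplit : ll.length = q + (sl.length + (ll.length - q - sl.length)) := by omega
  rw [hsplit, List.range_add, List.filter_append]
  have hleft : (List.range q).filter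
      (fun p => decide (q ≤ p) && decide (p - q < sl.length) && (sl.getD (p - q) ' ' == ll.getD p ' ')) = [] := by
    apply List.filter_eq_nil_iff.mpr
    intro p hp
    have : p < q := List.mem_range.mp hp
    simp [show ¬ (q ≤ p) by omega]
  rw [hleft]
  rw [List.filter_map]
  have hpred : ((fun p => decide (q ≤ p) && decide (p - q < sl.length) && (sl.getD (p - q) ' ' == ll.getD p ' '))
      ∘ (fun x => q + x)) = (fun j => decide (j < sl.length) && (sl.getD j ' ' == ll.getD (q + j) ' ')) := by
    funext j
    simp [Function.comp]
  rw [hpred]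
  rw [List.range_add, List.filter_append]
  have hright : (List.map (fun x => sl.length + x) (List.range (ll.length - q - sl.length))).filter
      (fun j => decide (j < sl.length) && (sl.getD j ' ' == ll.getD (q + j) ' ')) = [] := by
    apply List.filter_eq_nil_iff.mpr
    intro j hj
    obtain ⟨x, -, rfl⟩ := List.mem_map.mp hj
    simp [show ¬ (sl.length + x < sl.length) by omega]
  rw [hright, List.append_nil]
  have hmid : (List.range sl.length).filter
      (fun j => decide (j < sl.length) && (sl.getD j ' ' == ll.getD (q + j) ' '))
      = (List.range sl.length).filter (fun j => sl.getD j ' ' == (wnd ll sl.length (q : Int)).getD j ' ') := by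
    apply List.filter_congr
    intro j hj
    have hjm : j < sl.length := List.mem_range.mp hj
    rw [hwget j hjm]
    simp [hjm]
  rw [hmid]
  simp

theorem offsets_eq (sl ll : List Char) (k : Int) (hk : k = (ll.length : Int) - (sl.length : Int) + 1)
    (hpos : 0 < k) :
    (PySem.List.enumerate ll 0).foldl
        (fun off pr =>
          let js := (posTable sl).getD pr.2 []
          let lo := firstAtLeast js (pr.1 - k + 1) 0 js.length
          let hi := firstAtLeast js (pr.1 + 1) 0 js.length
          bumpLoop off pr.1 (PySem.List.slice js (some (lo : Int)) (some (hi : Int))))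
        (List.replicate k.toNat (0 : Int)) =
      (List.range k.toNat).map (fun (q : Nat) => bCount sl (wnd ll sl.length (q : Int))) := by
  have hinit : List.replicate k.toNat (0 : Int)
      = (List.range k.toNat).map (fun q => matchCnt sl ll q 0) := by
    symm
    rw [List.eq_replicate_iff]
    constructor
    · simp
    · intro b hb
      obtain ⟨x, -, rfl⟩ := List.mem_map.mp hb
      simp [matchCnt]
  rw [hinit]
  have h0 : ((0 : Nat) : Int) = (0 : Int) := rfl
  rw [← h0]
  rw [fold_enum sl ll k k.toNat (by omega) ll 0 (by simp)]
  apply List.map_congr_left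
  intro q hq
  have hqK : q < k.toNat := List.mem_range.mp hq
  have hle : q + sl.length ≤ ll.length := by omega
  rw [Nat.zero_add]
  exact matchCnt_final sl ll q hle

theorem zipfold_ge (l : List (Char × Char)) (acc : Int) :
    acc ≤ l.foldl (fun sc p => sc + (if p.1 == p.2 then (1 : Int) else 0)) acc := by
  induction l generalizing acc with
  | nil => simp
  | cons p t ih =>
    simp only [List.foldl_cons]
    exact le_trans (by split <;> omega) (ih _)

theorem bCount_nonneg (sl ch : List Char) : 0 ≤ bCount sl ch := zipfold_ge _ 0

theorem count_eq (u v : List Char) (hlen : u.length = v.length) : aScore u v = bCount u v := by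
  unfold aScore bCount
  have hz : (u.length : Int) = ((u.zip v).length : Int) := by
    simp [List.length_zip, hlen]
  rw [hz]
  have hc1 : List.foldl
      (fun sc j => if PySem.List.pyGetD u j ' ' == PySem.List.pyGetD v j ' ' then sc + 1 else sc)
      (0 : Int) (PySem.List.pyRange 0 (((u.zip v).length : Int)) 1)
      = List.foldl
      (fun sc j => (fun (sc : Int) (p : Char × Char) => if p.1 == p.2 then sc + 1 else sc) sc
        (PySem.List.pyGetD (u.zip v) j (' ', ' ')))
      (0 : Int) (PySem.List.pyRange 0 (((u.zip v).length : Int)) 1) := by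
    apply PySem.List.foldl_congr_mem
    intro acc j hj
    obtain ⟨h0, h1⟩ := PySem.List.mem_pyRange_one.mp hj
    have hju : j < (u.length : Int) := by
      have : (u.zip v).length ≤ u.length := by simp [List.length_zip]
      omega
    have hjv : j < (v.length : Int) := by omega
    rw [PySem.List.pyGetD_eq_getElem u ' ' h0 hju,
        PySem.List.pyGetD_eq_getElem v ' ' h0 hjv,
        PySem.List.pyGetD_eq_getElem (u.zip v) (' ', ' ') h0 h1]
    simp [List.getElem_zip]
  rw [hc1]
  rw [PySem.List.foldl_pyRange_zero_pyGetD' (u.zip v) (' ', ' ')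
      (fun (sc : Int) (p : Char × Char) => if p.1 == p.2 then sc + 1 else sc) 0]
  apply PySem.List.foldl_congr_mem
  intro acc p _
  by_cases hc : (p.1 == p.2) = true <;> simp [hc]

theorem sel_foldl_spec {α : Type} (ps : List (α × Int)) (a : α) (h : Int) :
    ps.foldl (fun st p => if p.2 > st.2 then p else st) (a, h) =
      (if h < (ps.map Prod.snd).foldl max h then
        (ps.find? (fun p => p.2 == (ps.map Prod.snd).foldl max h)).getD (a, h)
      else (a, h)) := by
  induction ps generalizing a h with
  | nil => simp
  | cons p t ih =>
    rcases p with ⟨p1, p2⟩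
    simp only [List.foldl_cons, List.map_cons]
    by_cases hp : p2 > h
    · rw [if_pos hp]
      rw [show max h p2 = p2 from max_eq_right hp.le]
      rw [ih p1 p2]
      have hle : p2 ≤ (t.map Prod.snd).foldl max p2 := (PySem.List.le_foldl_max _ _).1
      by_cases hb : p2 < (t.map Prod.snd).foldl max p2
      · rw [if_pos hb, if_pos (lt_trans hp hb)]
        rw [List.find?_cons_of_neg (by simp; omega)]
        rcases PySem.List.foldl_max_mem (t.map Prod.snd) p2 with heq | hmem
        · omega
        · obtain ⟨q, hq, hq2⟩ := List.mem_map.mp hmem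
          have : (t.find? (fun p => p.2 == (t.map Prod.snd).foldl max p2)).isSome :=
            List.find?_isSome.mpr ⟨q, hq, by simp [hq2]⟩
          obtain ⟨r, hr⟩ := Option.isSome_iff_exists.mp this
          rw [hr]
          rfl
      · have hpb : p2 = (t.map Prod.snd).foldl max p2 := le_antisymm hle (not_lt.mp hb)
        rw [if_neg hb, if_pos (by omega)]
        rw [List.find?_cons_of_pos (by simp [← hpb])]
        rfl
    · rw [if_neg hp]
      rw [show max h p2 = h from max_eq_left (by omega)]
      rw [ih a h]
      by_cases hb : h < (t.map Prod.snd).foldl max h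
      · rw [if_pos hb, if_pos hb]
        rw [List.find?_cons_of_neg (by simp; omega)]
      · rw [if_neg hb, if_neg hb]

theorem find?_eq_of_index? {α : Type} (ps : List (α × Int)) (b : Int) (k : Nat)
    (h : PySem.List.index? (ps.map Prod.snd) b = some k) :
    ps.find? (fun p => p.2 == b) = ps[k]? := by
  induction ps generalizing k with
  | nil => simp at h
  | cons p t ih =>
    simp only [List.map_cons] at h
    by_cases hpb : p.2 = b
    · rw [hpb, PySem.List.index?_cons_self b (t.map Prod.snd)] at h
      obtain rfl : (0 : Nat) = k := by simpa using h
      rw [List.find?_cons_of_pos (by simp [hpb])]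
      rfl
    · rw [PySem.List.index?_cons_of_ne (t.map Prod.snd) hpb] at h
      obtain ⟨k', hk', rfl⟩ : ∃ k', PySem.List.index? (t.map Prod.snd) b = some k' ∧ k' + 1 = k := by
        rcases Option.map_eq_some_iff.mp h with ⟨k', hk', hkk⟩
        exact ⟨k', hk', hkk⟩
      rw [List.find?_cons_of_neg (by simp [hpb])]
      rw [List.getElem?_cons_succ]
      exact ih k' hk'

theorem hom_eq (L S : String) : homology L S = homology_alt L S := by
  set ll := L.toList with hll
  set sl := S.toList with hsl
  set k : Int := (ll.length : Int) - (sl.length : Int) + 1 with hk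
  set w : Int → List Char := fun i => PySem.List.slice ll (some i) (some (i + (sl.length : Int))) with hw
  set is : List Int := PySem.List.pyRange 0 k 1 with his
  have hA : homology L S = String.ofList ((is.foldl
      (fun (st : List Char × Int) i =>
        if aScore sl (w i) > st.2 then (w i, aScore sl (w i)) else st)
      (([] : List Char), (0 : Int))).1) := rfl
  by_cases hkpos : k ≤ 0
  · have hisnil : is = [] := PySem.List.pyRange_one_eq_nil hkpos
    rw [hA, hisnil]
    show String.ofList [] = homology_alt L S
    have hB : homology_alt L S = "" := by
      simp only [homology_alt]
      rw [if_pos hkpos]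
    rw [hB]
  · have hkpos' : 0 < k := by omega
    have hoff := offsets_eq sl ll k hk hkpos'
    have hB : homology_alt L S =
        (match PySem.List.max? ((List.range k.toNat).map (fun (q : Nat) => bCount sl (wnd ll sl.length (q : Int)))) (fun x => x) with
        | none => ""
        | some best =>
          if best = 0 then ""
          else
            match PySem.List.index? ((List.range k.toNat).map (fun (q : Nat) => bCount sl (wnd ll sl.length (q : Int)))) best with
            | some i => String.ofList (PySem.List.slice ll (some (i : Int)) (some ((i : Int) + (sl.length : Int))))
            | none => "") := by
      simp only [homology_alt]
      rw [if_neg hkpos]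
      rw [hoff]
    set G : Int → List Char × Int := fun i => (w i, bCount sl (w i)) with hG
    set SC : List Int := (List.range k.toNat).map (fun (q : Nat) => bCount sl (wnd ll sl.length (q : Int))) with hSCdef
    rw [hA, hB]
    -- step 1: replace A's index-loop score by the canonical zip count
    have hstep : is.foldl
        (fun (st : List Char × Int) i =>
          if aScore sl (w i) > st.2 then (w i, aScore sl (w i)) else st)
        (([] : List Char), (0 : Int))
        = is.foldl
        (fun (st : List Char × Int) i =>
          if bCount sl (w i) > st.2 then (w i, bCount sl (w i)) else st)
        (([] : List Char), (0 : Int)) := by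
      apply PySem.List.foldl_congr_mem
      intro acc i hi
      rw [his] at hi
      obtain ⟨h0, h1⟩ := PySem.List.mem_pyRange_one.mp hi
      have hlen : sl.length = (w i).length := by
        have hwi : w i = PySem.List.slice ll (some i) (some (i + (sl.length : Int))) := rfl
        rw [hwi]
        rw [PySem.List.slice_toNat ll h0 (by omega)]
        simp only [List.length_take, List.length_drop]
        omega
      rw [count_eq sl (w i) hlen]
    rw [hstep]
    -- step 2: present A's fold as a fold over (window, score) pairs
    have h2 : is.foldl
        (fun (st : List Char × Int) i =>
          if bCount sl (w i) > st.2 then (w i, bCount sl (w i)) else st)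
        (([] : List Char), (0 : Int))
        = (is.map G).foldl (fun st p => if p.2 > st.2 then p else st)
          (([] : List Char), (0 : Int)) := by
      rw [List.foldl_map]
    rw [h2, sel_foldl_spec (is.map G) [] 0]
    have hps : (is.map G).map Prod.snd = SC := by
      rw [List.map_map, hSCdef, his, PySem.List.pyRange_one]
      rw [List.map_map]
      simp only [Int.sub_zero]
      apply List.map_congr_left
      intro j _
      simp [hG, hw, wnd]
    rw [hps]
    -- step 3: case on the list of scores
    cases hsc : SC with
    | nil =>
      exfalso
      have : SC.length = k.toNat := by rw [hSCdef]; simp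
      rw [hsc] at this
      simp at this
      omega
    | cons s0 t =>
      have hs0 : 0 ≤ s0 := by
        have hmem : s0 ∈ SC := by rw [hsc]; exact List.mem_cons_self ..
        rw [hSCdef] at hmem
        obtain ⟨q, -, hq⟩ := List.mem_map.mp hmem
        exact hq ▸ bCount_nonneg sl (wnd ll sl.length (q : Int))
      have hmax : PySem.List.max? (s0 :: t) (fun x => x) = some (t.foldl max s0) :=
        PySem.List.max?_id_cons s0 t
      rw [hmax]
      have hb : List.foldl max 0 (s0 :: t) = t.foldl max s0 := by
        rw [List.foldl_cons, max_eq_right hs0]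
      rw [hb]
      show _ = if List.foldl max s0 t = 0 then "" else _
      by_cases hzero : t.foldl max s0 = 0
      · rw [if_pos hzero, if_neg (by omega : ¬ (0 : Int) < t.foldl max s0)]
      · have hgt : (0 : Int) < t.foldl max s0 := by
          have := (PySem.List.le_foldl_max t s0).1
          omega
        rw [if_neg hzero, if_pos hgt]
        have hmem : t.foldl max s0 ∈ s0 :: t := by
          rcases PySem.List.foldl_max_mem t s0 with heq | hmem
          · rw [heq]; exact List.mem_cons_self ..
          · exact List.mem_cons_of_mem _ hmem
        obtain ⟨kidx, hkx⟩ := Option.isSome_iff_exists.mp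
          ((PySem.List.index?_isSome_iff (s0 :: t) (t.foldl max s0)).mpr hmem)
        rw [hkx]
        have hfind : (is.map G).find? (fun p => p.2 == t.foldl max s0) = (is.map G)[kidx]? := by
          apply find?_eq_of_index?
          rw [hps, hsc]
          exact hkx
        rw [hfind]
        obtain ⟨hk0, -, -⟩ := PySem.List.getElem_of_index?_eq_some hkx
        have hlenSC : (s0 :: t).length = k.toNat := by
          rw [← hsc, hSCdef]
          simp
        rw [List.getElem?_map]
        have hisk : is[kidx]? = some ((kidx : Int)) := by
          rw [his, PySem.List.getElem?_pyRange_one]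
          rw [if_pos (by omega)]
          norm_num
        rw [hisk]
        simp only [Option.map_some, Option.getD_some, hG]
        rfl

-- ===== VERDICT (by name: the statement is the Claim_ definition above) =====
theorem homology_spec : Claim_equal_homology := by
  intro L S _
  unfold Spec_homology
  exact hom_eq L S
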